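-- pv_equiv track=rewrite | github.com/buckley-w-david/advent-of-code | 2015/day01/day1.py | part_two
-- ===== SOURCE A (Python) =====
-- def part_two(data):
--     positon = 0
--     for i, instruction in enumerate(data):
--         if instruction == "(":
--             positon += 1
--         elif instruction == ")":
--             positon -= 1
--         if positon < 0:
--             return i + 1
-- ===== SOURCE B (Python) =====
-- def part_two(data):
--     # The running floor can only dip below zero at a ')'.  Visit the closing
--     # parens in order; the k-th ')' sends the floor to the basement exactly
--     # when fewer than k '(' occur before it.  The count is recomputed from the
--     # prefix with str.count each time -- no running balance is maintained.
--     k = 0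
--     for p, c in enumerate(data):
--         if c == ')':
--             k += 1
--             if data.count('(', 0, p) < k:
--                 return p + 1
--     return None
-- ===== Notes on version B (the rewrite author's own statement) =====
-- stated objective: alternative
-- what changed: B drops the running balance entirely: it visits only the closing parens and, at the k-th ')', recounts the '(' in the prefix with str.count and returns p+1 when that count is below k.
import Mathlib
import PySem

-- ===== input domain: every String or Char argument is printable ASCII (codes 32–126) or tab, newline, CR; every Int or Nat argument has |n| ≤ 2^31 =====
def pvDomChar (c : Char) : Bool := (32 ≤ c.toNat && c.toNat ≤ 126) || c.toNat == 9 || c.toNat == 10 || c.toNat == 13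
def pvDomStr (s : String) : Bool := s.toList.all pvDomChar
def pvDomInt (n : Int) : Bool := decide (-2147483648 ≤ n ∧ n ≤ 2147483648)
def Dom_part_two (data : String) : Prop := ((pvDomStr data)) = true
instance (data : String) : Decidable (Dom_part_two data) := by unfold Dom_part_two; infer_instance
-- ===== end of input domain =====

-- B replaces A's running-balance loop by a scan over closing parens that recounts '(' in the prefix at each ')' (alternative algorithm, quadratic).


-- ===== PORT A =====
-- literal port of A's single loop: running position, test after each update
def partTwoGo : List Char → Int → Int → Option Int
  | [], _, _ => none
  | c :: cs, pos, i =>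
    let pos' := if c = '(' then pos + 1 else if c = ')' then pos - 1 else pos
    if pos' < 0 then some (i + 1) else partTwoGo cs pos' (i + 1)

def part_two (data : String) : Option Int := partTwoGo data.toList 0 0

-- ===== PORT B =====
-- data.count('(', 0, p): number of '(' in the first p characters
def pvCountOpen (l : List Char) : Int := (l.count '(' : Int)

-- the loop: k counts ')' seen so far, p is the current index, all is the whole string
def partTwoAltGo : List Char → Nat → Nat → List Char → Option Int
  | [], _, _, _ => none
  | c :: cs, k, p, all =>
    if c = ')' then
      if pvCountOpen (all.take p) < (k : Int) + 1 then some ((p : Int) + 1)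
      else partTwoAltGo cs (k + 1) (p + 1) all
    else partTwoAltGo cs k (p + 1) all

def part_two_alt (data : String) : Option Int := partTwoAltGo data.toList 0 0 data.toList

-- ===== PRECONDITION & SPEC =====
def Spec_part_two (data : String) (out : Option Int) : Prop := out = part_two_alt data
instance (data : String) (out : Option Int) : Decidable (Spec_part_two data out) := by unfold Spec_part_two; infer_instance

-- ===== CLAIM (what is proved, stated in full; the proofs are below) =====
def Claim_equal_part_two : Prop := ∀ (data : String), Dom_part_two data → Spec_part_two data (part_two data)

-- ===== LEMMAS AND PROOFS =====
-- invariant: after a processed prefix `pre` on which A has not returned, A's running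
-- position equals  #'(' in pre − #')' in pre  and is nonnegative, while B carries
-- k = #')' in pre and p = pre.length.
theorem go_eq (cs : List Char) : ∀ (pre : List Char),
    0 ≤ (pre.count '(' : Int) - (pre.count ')' : Int) →
    partTwoAltGo cs (pre.count ')') pre.length (pre ++ cs)
      = partTwoGo cs ((pre.count '(' : Int) - (pre.count ')' : Int)) (pre.length : Int) := by
  induction cs with
  | nil => intro pre _; rfl
  | cons c cs ih =>
    intro pre hpos
    have htake : (pre ++ c :: cs).take pre.length = pre := by
      simpa using List.take_left (l₁ := pre) (l₂ := c :: cs)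
    by_cases hc : c = ')'
    · subst hc
      have hA : partTwoGo (')' :: cs) ((pre.count '(' : Int) - (pre.count ')' : Int)) (pre.length : Int)
          = if (pre.count '(' : Int) - (pre.count ')' : Int) - 1 < 0
            then some ((pre.length : Int) + 1)
            else partTwoGo cs ((pre.count '(' : Int) - (pre.count ')' : Int) - 1) ((pre.length : Int) + 1) := by
        simp [partTwoGo]
      have hB : partTwoAltGo (')' :: cs) (pre.count ')') pre.length (pre ++ ')' :: cs)
          = if pvCountOpen pre < ((pre.count ')' : Nat) : Int) + 1
            then some ((pre.length : Int) + 1)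
            else partTwoAltGo cs (pre.count ')' + 1) (pre.length + 1) (pre ++ ')' :: cs) := by
        simp [partTwoAltGo, htake]
      rw [hA, hB]
      by_cases hneg : (pre.count '(' : Int) < (pre.count ')' : Int) + 1
      · rw [if_pos (by simpa [pvCountOpen] using hneg), if_pos (by omega)]
      · rw [if_neg (by simpa [pvCountOpen] using hneg), if_neg (by omega)]
        have hfin := ih (pre ++ [')']) (by simp; push_cast; omega)
        simp only [List.count_append, List.length_append, List.append_assoc,
          List.cons_append, List.nil_append] at hfin
        simp at hfin
        convert hfin using 2 <;> push_cast <;> ring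
    · by_cases ho : c = '('
      · subst ho
        simp only [partTwoAltGo, partTwoGo]
        have hne : ¬ ('(' = ')') := by decide
        have h1 : ¬ ((pre.count '(' : Int) + 1 - (pre.count ')' : Int) < 0) := by omega
        have := ih (pre ++ ['('])
        simp only [List.count_append, List.count_singleton, List.length_append,
          List.append_assoc, List.cons_append, List.nil_append] at this
        have hfin := this (by push_cast; omega)
        simp only [hne, if_false, if_true, if_neg (show ¬ ((pre.count '(' : Int) - (pre.count ')' : Int) + 1 < 0) by omega)]
        push_cast at hfin ⊢
        convert hfin using 2 <;> simp <;> ring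
      · simp only [partTwoAltGo, partTwoGo, if_neg hc, if_neg ho,
          if_neg (show ¬ ((pre.count '(' : Int) - (pre.count ')' : Int) < 0) by omega)]
        have := ih (pre ++ [c])
        simp only [List.count_append, List.length_append, List.append_assoc,
          List.cons_append, List.nil_append] at this
        have hco : [c].count '(' = 0 := by simp [List.count_singleton, ho]
        have hcc : [c].count ')' = 0 := by simp [List.count_singleton, hc]
        rw [hco, hcc] at this
        have hfin := this (by push_cast; omega)
        push_cast at hfin ⊢
        convert hfin using 2 <;> simp <;> ring

-- ===== VERDICT (by name: the statement is the Claim_ definition above) =====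
theorem part_two_spec : Claim_equal_part_two := by
  intro data _
  unfold Spec_part_two part_two part_two_alt
  simpa using (go_eq data.toList [] (by simp)).symm
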